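-- pv_equiv track=rewrite | github.com/kmlst/TIPE-Coding-regions-in-DNA-with-Hidden-Markov-Model | tipe_code.py | max_arg
-- ===== SOURCE A (Python) =====
-- def max_arg(liste):
--     """ renvoie le max de la liste et le plus petit indice ou il a ete realise"""
--     m = liste[0]
--     i_max = 0
--     for n in range(len(liste)):
--         if liste[n] > m:
--             m = liste[n]
--             i_max = n
--     return m, i_max
-- ===== SOURCE B (Python) =====
-- def max_arg(liste):
--     """ renvoie le max de la liste et le plus petit indice ou il a ete realise"""
--     m = max(liste)
--     return m, liste.index(m)
-- ===== Notes on version B (the rewrite author's own statement) =====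
-- stated objective: idiomatic
-- what changed: Replaces the explicit running-max/running-index loop by two library passes: max(liste) finds the (first) maximum value and liste.index locates its smallest index.
import Mathlib
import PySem

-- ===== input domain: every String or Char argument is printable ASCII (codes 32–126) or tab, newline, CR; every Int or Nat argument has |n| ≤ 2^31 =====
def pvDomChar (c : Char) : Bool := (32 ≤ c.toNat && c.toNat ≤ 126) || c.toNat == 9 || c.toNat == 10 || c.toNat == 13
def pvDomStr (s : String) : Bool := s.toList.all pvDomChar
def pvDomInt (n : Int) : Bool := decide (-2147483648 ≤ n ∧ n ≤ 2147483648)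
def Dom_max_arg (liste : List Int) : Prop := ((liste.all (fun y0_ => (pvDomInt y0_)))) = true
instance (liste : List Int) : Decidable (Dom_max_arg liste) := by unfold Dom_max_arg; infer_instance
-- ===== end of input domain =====

-- B replaces A's single explicit running-max/running-index loop by the idiomatic
-- two library passes max + index; return values proved equal on non-empty lists.

-- ===== PORT A =====
-- m = liste[0]; i_max = 0; for n in range(len(liste)): if liste[n] > m: m, i_max = liste[n], n
-- liste[0] on [] raises IndexError (excluded by Pre_); pyGetD's default 0 is never the value used inside Pre_.
def max_arg (liste : List Int) : Int × Int :=
  let m := PySem.List.pyGetD liste 0 0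
  let i_max : Int := 0
  (PySem.List.pyRange 0 (liste.length : Int) 1).foldl
    (fun (st : Int × Int) (n : Int) =>
      if PySem.List.pyGetD liste n 0 > st.1 then (PySem.List.pyGetD liste n 0, n) else st)
    (m, i_max)

-- ===== PORT B =====
-- m = max(liste); return m, liste.index(m)
-- max([]) raises ValueError (excluded by Pre_); index never fails since m ∈ liste, so the
-- `none` branches are unreachable under Pre_.
def max_arg_alt (liste : List Int) : Int × Int :=
  match PySem.List.max? liste (fun y => y) with
  | none => (0, 0)
  | some m =>
    match PySem.List.index? liste m with
    | none => (m, 0)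
    | some k => (m, (k : Int))

-- ===== PRECONDITION & SPEC =====
-- A raises IndexError (and B ValueError) on the empty list; Pre_ excludes exactly it.
def Pre_max_arg (liste : List Int) : Prop := liste ≠ []
instance (liste : List Int) : Decidable (Pre_max_arg liste) := by unfold Pre_max_arg; infer_instance
def pvWitness_max_arg : List Int := ([3, 7, 7, -1])

def Spec_max_arg (liste : List Int) (out : Int × Int) : Prop := out = max_arg_alt liste
instance (liste : List Int) (out : Int × Int) : Decidable (Spec_max_arg liste out) := by unfold Spec_max_arg; infer_instance

-- ===== CLAIM (what is proved, stated in full; the proofs are below) =====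
def Claim_equal_max_arg : Prop := ∀ (liste : List Int), Dom_max_arg liste → Pre_max_arg liste → Spec_max_arg liste (max_arg liste)

-- ===== LEMMAS AND PROOFS =====

/-- A's loop, written as structural recursion over the suffix `t` of the list,
with `k` the index of the head of `t` in the full list. -/
def pvLoop : List Int → Int → Int → Int → Int × Int
  | [], m, i, _ => (m, i)
  | v :: t, m, i, k => if v > m then pvLoop t v k (k + 1) else pvLoop t m i (k + 1)

theorem pv_le_foldl_max (x : Int) (t : List Int) : x <= t.foldl max x := by
  induction t generalizing x with
  | nil => simp
  | cons v t ih => exact le_trans (le_max_left x v) (ih (max x v))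

theorem pvLoop_spec (t : List Int) : forall (m i k : Int),
    pvLoop t m i k =
      (t.foldl max m,
       if m < t.foldl max m then k + ((t.idxOf (t.foldl max m) : Nat) : Int) else i) := by
  induction t with
  | nil => intro m i k; simp [pvLoop]
  | cons v t ih =>
    intro m i k
    by_cases hv : v > m
    . simp only [pvLoop, if_pos hv, ih, List.foldl_cons]
      have hmv : max m v = v := max_eq_right (le_of_lt hv)
      rw [hmv]
      simp only [Prod.mk.injEq, true_and]
      have hM : v <= t.foldl max v := pv_le_foldl_max v t
      by_cases hvM : v = t.foldl max v
      . simp [<- hvM, List.idxOf_cons, lt_irrefl, hv]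
      . have hlt : v < t.foldl max v := lt_of_le_of_ne hM hvM
        have hm : m < t.foldl max v := lt_trans hv hlt
        have hne : (v == t.foldl max v) = false := by simp [hvM]
        simp only [if_pos hlt, if_pos hm, List.idxOf_cons, hne, cond_false]
        push_cast
        ring
    . push_neg at hv
      simp only [pvLoop, if_neg (not_lt.mpr hv), ih, List.foldl_cons]
      have hmv : max m v = m := max_eq_left hv
      rw [hmv]
      simp only [Prod.mk.injEq, true_and]
      by_cases hlt : m < t.foldl max m
      . have hvM : v ≠ t.foldl max m := by
          intro h; rw [<- h] at hlt; exact absurd (lt_of_le_of_lt hv hlt) (lt_irrefl _)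
        have hne : (v == t.foldl max m) = false := by simp [hvM]
        simp only [if_pos hlt, List.idxOf_cons, hne, cond_false]
        push_cast
        ring
      . simp [if_neg hlt]

/-- `v ∈ xs` makes `index?` return the first-occurrence index `idxOf`. -/
theorem pv_index?_mem (xs : List Int) (v : Int) (h : v ∈ xs) :
    PySem.List.index? xs v = some ((xs.idxOf v : Nat)) := by
  induction xs with
  | nil => cases h
  | cons x t ih =>
    by_cases hx : x = v
    . subst hx
      rw [PySem.List.index?_cons_self]
      simp [List.idxOf_cons]
    . have hv : v ∈ t := by
        cases h with
        | head => exact absurd rfl hx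
        | tail _ h' => exact h'
      rw [PySem.List.index?_cons_of_ne t hx, ih hv]
      have : (x == v) = false := by simp [hx]
      simp [List.idxOf_cons, this]

/-- Bridge: A's foldl over `pyRange a len 1` with `pyGetD` accesses equals `pvLoop` on the
corresponding suffix. -/
theorem pvBridge (t : List Int) : forall (xs : List Int) (a : Int) (m i : Int), 0 <= a ->
    xs.drop a.toNat = t ->
    (PySem.List.pyRange a (xs.length : Int) 1).foldl
      (fun (st : Int × Int) (n : Int) =>
        if PySem.List.pyGetD xs n 0 > st.1 then (PySem.List.pyGetD xs n 0, n) else st)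
      (m, i) = pvLoop t m i a := by
  induction t with
  | nil =>
    intro xs a m i ha hdrop
    have hlen : xs.length <= a.toNat := by
      by_contra hc
      push_neg at hc
      have := List.length_drop (l := xs) (i := a.toNat)
      rw [hdrop] at this
      simp at this
      omega
    have : (xs.length : Int) <= a := by omega
    rw [PySem.List.pyRange_one_eq_nil this]
    simp [pvLoop]
  | cons v t ih =>
    intro xs a m i ha hdrop
    have hne : xs.drop a.toNat ≠ [] := by rw [hdrop]; simp
    have hlt : a.toNat < xs.length := by
      by_contra hc
      push_neg at hc
      exact hne (List.drop_eq_nil_of_le hc)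
    have haint : a < (xs.length : Int) := by omega
    have hdropsucc : xs.drop a.toNat = xs[a.toNat] :: xs.drop (a.toNat + 1) :=
      List.drop_eq_getElem_cons hlt
    rw [hdrop] at hdropsucc
    have hv : v = xs[a.toNat] := (List.cons.injEq _ _ _ _ ▸ hdropsucc).1
    have ht : xs.drop (a.toNat + 1) = t := ((List.cons.injEq _ _ _ _ ▸ hdropsucc).2).symm
    have hget : PySem.List.pyGetD xs a 0 = xs[a.toNat] :=
      PySem.List.pyGetD_eq_getElem xs 0 ha (by exact_mod_cast haint)
    rw [PySem.List.pyRange_one_cons haint]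
    simp only [List.foldl_cons, hget, <- hv]
    have ha1 : (0:Int) <= a + 1 := by omega
    have hdrop1 : xs.drop (a+1).toNat = t := by
      have : (a+1).toNat = a.toNat + 1 := by omega
      rw [this]; exact ht
    by_cases hc : v > m
    . rw [if_pos hc]
      rw [ih xs (a+1) v a ha1 hdrop1]
      simp [pvLoop, hc]
    . rw [if_neg hc]
      rw [ih xs (a+1) m i ha1 hdrop1]
      simp [pvLoop, hc]

theorem max_arg_spec : Claim_equal_max_arg := by
  intro liste _ hpre
  unfold Spec_max_arg
  match liste with
  | [] => exact absurd rfl hpre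
  | x :: t =>
    have hM : x <= t.foldl max x := pv_le_foldl_max x t
    have hmem : t.foldl max x ∈ x :: t := by
      rcases PySem.List.foldl_max_mem t x with h | h
      . rw [h]; exact List.mem_cons_self
      . exact List.mem_cons_of_mem _ h
    have hA : max_arg (x :: t) = pvLoop (x :: t) x 0 0 := by
      simp only [max_arg]
      rw [PySem.List.pyGetD_zero_cons]
      exact pvBridge (x :: t) (x :: t) 0 x 0 le_rfl (by simp)
    have h2 : List.idxOf? (t.foldl max x) (x :: t) = some ((x :: t).idxOf (t.foldl max x)) := by
      rw [<- PySem.List.index?_eq_idxOf?]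
      exact pv_index?_mem _ _ hmem
    have hB : max_arg_alt (x :: t) = (t.foldl max x, (((x :: t).idxOf (t.foldl max x) : Nat) : Int)) := by
      simp [max_arg_alt, PySem.List.max?_id_cons, h2]
    rw [hA, hB, pvLoop_spec]
    have hfold : (x :: t).foldl max x = t.foldl max x := by simp
    rw [hfold]
    by_cases hlt : x < t.foldl max x
    . have hxne : (x == t.foldl max x) = false := by
        simp only [beq_eq_false_iff_ne, ne_eq]
        omega
      simp [if_pos hlt, List.idxOf_cons, hxne]
    . have hx : x = t.foldl max x := le_antisymm hM (not_lt.mp hlt)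
      have hxeq : (x == t.foldl max x) = true := by
        simp only [beq_iff_eq]
        exact hx
      simp [if_neg hlt, List.idxOf_cons, hxeq]
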